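-- pv_equiv track=rewrite | github.com/fallingstars2/brimer | bridge/text.py | assign_players_by_cards
-- ===== SOURCE A (Python) =====
-- def assign_players_by_cards(chu,n,e,s,w): # 出牌规则化
--     """
--     根据 BridgeItem 里的 n/e/s/w 四家手牌，给 chu 每张牌标记出牌人。
--     返回同样结构，只是把每张牌换成 (player, card)。
--     """
--     # 把四家牌做成查找表
--     player_hands = {
--         'n': set(n),
--         'e': set(e),
--         's': set(s),
--         'w': set(w)
--     }
--
--     result = []
--
--     for trick in chu:
--         trick_result = []
--         for card in trick:
--             found = False
--             for player, cards in player_hands.items():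
--                 if card in cards:
--                     trick_result.append((player, card))
--                     cards.remove(card)  # 用过的牌去掉，避免重复
--                     found = True
--                     break
--             if not found:
--                 raise ValueError(f"牌 {card} 没有在任何人的手牌中找到！")
--         result.append(trick_result)
--
--     return result
-- ===== SOURCE B (Python) =====
-- def assign_players_by_cards(chu, n, e, s, w):  # 出牌规则化
--     """
--     Same task as A, via an inverted index: one pass over the hands builds
--     card -> queue of owners (in n,e,s,w order), then each played card pops
--     its next owner -- no inner scan over the four players.
--     """
--     card2owners = {}
--     for player, hand in (('n', n), ('e', e), ('s', s), ('w', w)):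
--         for card in dict.fromkeys(hand):  # dedupe, like set(hand)
--             card2owners.setdefault(card, []).append(player)
--
--     result = []
--     for trick in chu:
--         trick_result = []
--         for card in trick:
--             owners = card2owners.get(card)
--             if not owners:
--                 raise ValueError(f"牌 {card} 没有在任何人的手牌中找到！")
--             trick_result.append((owners.pop(0), card))
--         result.append(trick_result)
--     return result
-- ===== Notes on version B (the rewrite author's own statement) =====
-- stated objective: idiomatic
-- what changed: Replaces the per-card inner scan over the four mutable hand-sets by an inverted index card->queue of owners (in n,e,s,w order) built once, so each played card just pops its next owner.
import Mathlib
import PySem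

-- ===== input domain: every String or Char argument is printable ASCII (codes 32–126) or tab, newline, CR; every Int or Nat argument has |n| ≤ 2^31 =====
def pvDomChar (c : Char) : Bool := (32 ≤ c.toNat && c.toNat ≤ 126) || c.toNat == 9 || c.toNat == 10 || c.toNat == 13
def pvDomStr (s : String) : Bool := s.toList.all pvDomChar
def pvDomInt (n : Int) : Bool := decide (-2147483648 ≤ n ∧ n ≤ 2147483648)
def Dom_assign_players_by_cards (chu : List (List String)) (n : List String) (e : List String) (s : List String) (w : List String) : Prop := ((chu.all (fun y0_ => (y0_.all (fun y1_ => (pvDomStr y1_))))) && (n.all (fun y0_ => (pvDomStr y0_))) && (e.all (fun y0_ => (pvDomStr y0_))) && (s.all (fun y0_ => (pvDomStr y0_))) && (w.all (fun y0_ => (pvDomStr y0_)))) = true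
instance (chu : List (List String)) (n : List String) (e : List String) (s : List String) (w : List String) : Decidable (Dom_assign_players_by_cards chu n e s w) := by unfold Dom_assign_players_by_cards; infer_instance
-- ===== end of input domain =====

-- B replaces A's per-card scan over four mutable hand-sets with an inverted index
-- card -> owner queue built once (idiomatic restructuring; no speed claim).


-- ===== PORT A =====
-- inner 'for player, cards in player_hands.items(): … break': first pair whose set
-- holds the card; that set loses the card ('cards.remove(card)', guarded by the
-- membership test, so Set.discard is exact here).
def pvFindRemove (card : String) :
    List (String × PySem.Set String) → Option String × List (String × PySem.Set String)
  | [] => (none, [])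
  | (p, cs) :: rest =>
    if PySem.Set.contains cs card then
      (some p, (p, PySem.Set.discard cs card) :: rest)
    else
      let r := pvFindRemove card rest
      (r.1, (p, cs) :: r.2)

def pvAStep (st : List (String × PySem.Set String) × List (String × String)) (card : String) :
    List (String × PySem.Set String) × List (String × String) :=
  match pvFindRemove card st.1 with
  | (some p, h) => (h, st.2 ++ [(p, card)])
  | (none, h) => (h, st.2)   -- Python raises ValueError here; Pre_ excludes these inputs

def pvATrick (st : List (String × PySem.Set String) × List (List (String × String)))
    (trick : List String) :
    List (String × PySem.Set String) × List (List (String × String)) :=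
  let r := trick.foldl pvAStep (st.1, [])
  (r.1, st.2 ++ [r.2])

def assign_players_by_cards (chu : List (List String)) (n : List String) (e : List String) (s : List String) (w : List String) : List (List (String × String)) :=
  (chu.foldl pvATrick
    ([("n", PySem.Set.ofList n), ("e", PySem.Set.ofList e),
      ("s", PySem.Set.ofList s), ("w", PySem.Set.ofList w)], [])).2

-- ===== PORT B =====
-- 'for card in dict.fromkeys(hand): card2owners.setdefault(card, []).append(player)'
def pvBuildIndex (n e s w : List String) : PySem.Dict String (List String) :=
  [("n", n), ("e", e), ("s", s), ("w", w)].foldl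
    (fun d ph =>
      (PySem.List.dedup ph.2).foldl (fun d c => d.modify c [] (· ++ [ph.1])) d)
    PySem.Dict.empty

def pvBStep (st : PySem.Dict String (List String) × List (String × String)) (card : String) :
    PySem.Dict String (List String) × List (String × String) :=
  match st.1.get? card with
  | some (p :: rest) => (st.1.insert card rest, st.2 ++ [(p, card)])  -- owners.pop(0)
  | _ => (st.1, st.2)   -- 'if not owners: raise ValueError' ; Pre_ excludes these inputs

def pvBTrick (st : PySem.Dict String (List String) × List (List (String × String)))
    (trick : List String) :
    PySem.Dict String (List String) × List (List (String × String)) :=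
  let r := trick.foldl pvBStep (st.1, [])
  (r.1, st.2 ++ [r.2])

def assign_players_by_cards_alt (chu : List (List String)) (n : List String) (e : List String) (s : List String) (w : List String) : List (List (String × String)) :=
  (chu.foldl pvBTrick (pvBuildIndex n e s w, [])).2

-- ===== PRECONDITION & SPEC =====
-- Pre_ excludes exactly the inputs where A raises ValueError: some card is played
-- more often than the number of hands (deduplicated) it occurs in.
def Pre_assign_players_by_cards (chu : List (List String)) (n : List String) (e : List String) (s : List String) (w : List String) : Prop :=
  ∀ c ∈ chu.flatten, chu.flatten.count c ≤ [n, e, s, w].countP (fun h => decide (c ∈ h))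
instance (chu : List (List String)) (n : List String) (e : List String) (s : List String) (w : List String) : Decidable (Pre_assign_players_by_cards chu n e s w) := by unfold Pre_assign_players_by_cards; infer_instance

def pvWitness_assign_players_by_cards : List (List String) × List String × List String × List String × List String :=
  ([["A", "K"], ["A"]], ["A", "K"], ["A"], [], [])

def Spec_assign_players_by_cards (chu : List (List String)) (n : List String) (e : List String) (s : List String) (w : List String) (out : List (List (String × String))) : Prop := out = assign_players_by_cards_alt chu n e s w
instance (chu : List (List String)) (n : List String) (e : List String) (s : List String) (w : List String) (out : List (List (String × String))) : Decidable (Spec_assign_players_by_cards chu n e s w out) := by unfold Spec_assign_players_by_cards; infer_instance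

-- ===== CLAIM (what is proved, stated in full; the proofs are below) =====
def Claim_equal_assign_players_by_cards : Prop := ∀ (chu : List (List String)) (n : List String) (e : List String) (s : List String) (w : List String), Dom_assign_players_by_cards chu n e s w → Pre_assign_players_by_cards chu n e s w → Spec_assign_players_by_cards chu n e s w (assign_players_by_cards chu n e s w)

-- ===== LEMMAS AND PROOFS =====

-- the queue of owners B's index must hold for card c, read off A's current hands
def pvOwners (c : String) (hands : List (String × PySem.Set String)) : List String :=
  (hands.filter (fun ph => decide (c ∈ ph.2))).map Prod.fst

theorem pvOwners_nil (c : String) : pvOwners c [] = [] := rfl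

theorem pvOwners_cons (c p : String) (cs : PySem.Set String)
    (tl : List (String × PySem.Set String)) :
    pvOwners c ((p, cs) :: tl) =
      (if c ∈ cs then [p] else []) ++ pvOwners c tl := by
  by_cases h : c ∈ cs <;> simp [pvOwners, h]

theorem pvFindRemove_none (card : String) (hands : List (String × PySem.Set String))
    (h : pvOwners card hands = []) : pvFindRemove card hands = (none, hands) := by
  induction hands with
  | nil => rfl
  | cons ph tl ih =>
    obtain ⟨p, cs⟩ := ph
    rw [pvOwners_cons] at h
    by_cases hc : card ∈ cs
    · simp [hc] at h
    · simp only [hc, if_false, List.nil_append] at h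
      simp [pvFindRemove, hc, ih h]

theorem pvFindRemove_cons (card : String) (hands : List (String × PySem.Set String))
    (p : String) (rest : List String) (h : pvOwners card hands = p :: rest) :
    (pvFindRemove card hands).1 = some p ∧
      ∀ c, pvOwners c (pvFindRemove card hands).2 =
        if c = card then rest else pvOwners c hands := by
  induction hands generalizing p rest with
  | nil => simp [pvOwners] at h
  | cons ph tl ih =>
    obtain ⟨q, cs⟩ := ph
    rw [pvOwners_cons] at h
    by_cases hc : card ∈ cs
    · simp only [hc, if_true, List.cons_append, List.nil_append, List.cons.injEq] at h
      obtain ⟨hq, hrest⟩ := h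
      subst hq
      have hcc : PySem.Set.contains cs card = true := (PySem.Set.contains_iff _ _).mpr hc
      refine ⟨by simp [pvFindRemove, hc], fun c => ?_⟩
      simp only [pvFindRemove]
      rw [if_pos hcc, pvOwners_cons]
      by_cases hcard : c = card
      · subst hcard
        simp [PySem.Set.mem_discard, hrest]
      · simp [PySem.Set.mem_discard, hcard, pvOwners_cons]
    · simp only [hc, if_false, List.nil_append] at h
      obtain ⟨h1, h2⟩ := ih p rest h
      have hcc : ¬ PySem.Set.contains cs card = true :=
        fun hx => hc ((PySem.Set.contains_iff _ _).mp hx)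
      refine ⟨by simp [pvFindRemove, hc, h1], fun c => ?_⟩
      simp only [pvFindRemove]
      rw [if_neg hcc, pvOwners_cons, h2 c]
      by_cases hcard : c = card
      · subst hcard; simp [hc]
      · simp [hcard, pvOwners_cons]

theorem pvStep_corr (card : String) (hands : List (String × PySem.Set String))
    (d : PySem.Dict String (List String)) (acc : List (String × String))
    (hR : ∀ c, d.getD c [] = pvOwners c hands) :
    (pvBStep (d, acc) card).2 = (pvAStep (hands, acc) card).2 ∧
      ∀ c, (pvBStep (d, acc) card).1.getD c [] =
        pvOwners c (pvAStep (hands, acc) card).1 := by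
  rcases hO : pvOwners card hands with _ | ⟨p, rest⟩
  · have hg : d.getD card [] = [] := by rw [hR card, hO]
    have hA : pvAStep (hands, acc) card = (hands, acc) := by
      simp [pvAStep, pvFindRemove_none card hands hO]
    have hB : pvBStep (d, acc) card = (d, acc) := by
      rw [PySem.Dict.getD_eq_get?_getD] at hg
      rcases hq : d.get? card with _ | l
      · simp [pvBStep, hq]
      · rw [hq] at hg
        simp only [Option.getD_some] at hg
        subst hg
        simp [pvBStep, hq]
    rw [hA, hB]
    exact ⟨rfl, hR⟩
  · have hg : d.getD card [] = p :: rest := by rw [hR card, hO]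
    obtain ⟨h1, h2⟩ := pvFindRemove_cons card hands p rest hO
    have hq : d.get? card = some (p :: rest) := by
      rw [PySem.Dict.getD_eq_get?_getD] at hg
      rcases hx : d.get? card with _ | l
      · rw [hx] at hg; simp at hg
      · rw [hx] at hg; simp only [Option.getD_some] at hg; rw [hg]
    have hr : pvFindRemove card hands = (some p, (pvFindRemove card hands).2) := by
      rw [← h1]
    have hA : pvAStep (hands, acc) card =
        ((pvFindRemove card hands).2, acc ++ [(p, card)]) := by
      rw [pvAStep]
      rw [hr]
    have hB : pvBStep (d, acc) card = (d.insert card rest, acc ++ [(p, card)]) := by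
      simp [pvBStep, hq]
    rw [hA, hB]
    refine ⟨rfl, fun c => ?_⟩
    rw [PySem.Dict.getD_insert, h2 c]
    by_cases hcard : c = card
    · simp [hcard]
    · simp [hcard, hR c]

theorem pvLoop_corr (cards : List String) (hands : List (String × PySem.Set String))
    (d : PySem.Dict String (List String)) (accA accB : List (String × String))
    (hacc : accB = accA)
    (hR : ∀ c, d.getD c [] = pvOwners c hands) :
    (cards.foldl pvBStep (d, accB)).2 = (cards.foldl pvAStep (hands, accA)).2 ∧
      ∀ c, (cards.foldl pvBStep (d, accB)).1.getD c [] =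
        pvOwners c ((cards.foldl pvAStep (hands, accA)).1) := by
  induction cards generalizing hands d accA accB with
  | nil => exact ⟨hacc, hR⟩
  | cons card cs ih =>
    rw [hacc]
    obtain ⟨e1, e2⟩ := pvStep_corr card hands d accA hR
    simpa using ih (pvAStep (hands, accA) card).1 (pvBStep (d, accA) card).1
      (pvAStep (hands, accA) card).2 (pvBStep (d, accA) card).2 e1 e2

theorem pvOuter_corr (chu : List (List String)) (hands : List (String × PySem.Set String))
    (d : PySem.Dict String (List String)) (res : List (List (String × String)))
    (hR : ∀ c, d.getD c [] = pvOwners c hands) :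
    (chu.foldl pvBTrick (d, res)).2 = (chu.foldl pvATrick (hands, res)).2 := by
  induction chu generalizing hands d res with
  | nil => rfl
  | cons t ts ih =>
    obtain ⟨e1, e2⟩ := pvLoop_corr t hands d [] [] rfl hR
    simp only [List.foldl_cons, pvBTrick, pvATrick]
    rw [e1]
    exact ih (t.foldl pvAStep (hands, [])).1 (t.foldl pvBStep (d, [])).1 _ e2

theorem pvFoldl_modify_const (l : List String) (hl : l.Nodup) (p : String)
    (d : PySem.Dict String (List String)) (c : String) :
    (l.foldl (fun d x => d.modify x [] (· ++ [p])) d).getD c [] =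
      d.getD c [] ++ (if c ∈ l then [p] else []) := by
  induction l generalizing d with
  | nil => simp
  | cons x xs ih =>
    obtain ⟨hx, hxs⟩ := List.nodup_cons.mp hl
    simp only [List.foldl_cons]
    rw [ih hxs, PySem.Dict.getD_modify]
    by_cases hc : c = x
    · subst hc
      simp [hx]
    · simp [hc]

theorem pvInit_corr (n e s w : List String) (c : String) :
    (pvBuildIndex n e s w).getD c [] =
      pvOwners c [("n", PySem.Set.ofList n), ("e", PySem.Set.ofList e),
        ("s", PySem.Set.ofList s), ("w", PySem.Set.ofList w)] := by
  simp only [pvBuildIndex, List.foldl_cons, List.foldl_nil]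
  rw [pvFoldl_modify_const _ (PySem.List.nodup_dedup w),
      pvFoldl_modify_const _ (PySem.List.nodup_dedup s),
      pvFoldl_modify_const _ (PySem.List.nodup_dedup e),
      pvFoldl_modify_const _ (PySem.List.nodup_dedup n)]
  simp only [pvOwners_cons, pvOwners_nil, PySem.Set.mem_ofList, PySem.Dict.getD_empty,
    PySem.List.mem_dedup, List.nil_append, List.append_nil, List.append_assoc]

-- ===== VERDICT (by name: the statement is the Claim_ definition above) =====
theorem assign_players_by_cards_spec : Claim_equal_assign_players_by_cards := by
  intro chu n e s w _ _
  unfold Spec_assign_players_by_cards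
  unfold assign_players_by_cards assign_players_by_cards_alt
  exact (pvOuter_corr chu _ _ [] (pvInit_corr n e s w)).symm
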